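-- pv_equiv track=rewrite | github.com/tjhunter/navigate-sf | python/mm/data/dates.py | date_range
-- ===== SOURCE A (Python) =====
-- def date_range(date_from, date_to):
--   res = []
--   (y,m,d) = (date_from)
--   (y_to, m_to, d_to) = date_to
--   while y < y_to or (y==y_to and m < m_to) or (y==y_to and m == m_to and d <= d_to):
--     res.append((y,m,d))
--     d += 1
--     if d > 31:
--       m += 1
--       d = 1
--     if m > 12:
--       y += 1
--       m = 1
--   return res
-- ===== SOURCE B (Python) =====
-- def date_range(date_from, date_to):
--     # Enumerate days on the flat 12x31-per-year grid: a day maps to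
--     # n = (y*12 + m-1)*31 + d-1, and each n decodes back with divmod.
--     if tuple(date_from) > tuple(date_to):
--         return []
--     (y, m, d) = date_from
--     (y_to, m_to, d_to) = date_to
--     start = (y * 12 + m - 1) * 31 + d - 1
--     stop = (y_to * 12 + m_to - 1) * 31 + d_to - 1
--     return [(n // 372, n // 31 % 12 + 1, n % 31 + 1)
--             for n in range(start, stop + 1)]
-- ===== Notes on version B (the rewrite author's own statement) =====
-- stated objective: simpler
-- what changed: Replaces A's stateful day/month/year carry loop with an empty-range early return plus a single integer range over the flat encoding n=(y*12+m-1)*31+d-1 decoded by divmod; Pre_ excludes non-empty ranges whose bounds are not genuine calendar tuples (m outside 1..12 or d outside 1..31), where A's raw/partially-carried output tuples are accidents of its carry order.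
-- outside the precondition, e.g. on date_range((0, 13, 5), (0, 13, 6)): A returns [(0, 13, 5)], B returns [(1, 1, 5), (1, 1, 6)]
import Mathlib
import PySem

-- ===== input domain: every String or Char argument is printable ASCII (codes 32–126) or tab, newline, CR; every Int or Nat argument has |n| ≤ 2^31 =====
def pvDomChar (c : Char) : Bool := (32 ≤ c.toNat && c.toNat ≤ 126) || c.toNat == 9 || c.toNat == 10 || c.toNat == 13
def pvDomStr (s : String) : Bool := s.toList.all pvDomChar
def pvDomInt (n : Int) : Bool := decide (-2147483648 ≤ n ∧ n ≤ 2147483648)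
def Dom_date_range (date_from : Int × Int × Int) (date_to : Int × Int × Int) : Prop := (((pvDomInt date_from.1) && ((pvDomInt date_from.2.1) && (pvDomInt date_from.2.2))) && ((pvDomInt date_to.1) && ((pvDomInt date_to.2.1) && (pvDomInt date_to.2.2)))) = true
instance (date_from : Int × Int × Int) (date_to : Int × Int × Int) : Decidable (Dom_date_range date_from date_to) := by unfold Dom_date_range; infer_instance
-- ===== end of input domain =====

-- B replaces A's stateful day/month/year carry loop by a single integer range over
-- the flat encoding n = (y*12 + m-1)*31 + d-1 decoded with divmod (simpler decomposition).

-- ===== PORT A =====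
-- A's while condition (Python tuple-style comparison written out, as in A)
def pvCond (tgt s : Int × Int × Int) : Bool :=
  s.1 < tgt.1 || (s.1 == tgt.1 && s.2.1 < tgt.2.1) || (s.1 == tgt.1 && s.2.1 == tgt.2.1 && s.2.2 <= tgt.2.2)

-- "if m > 12: y += 1; m = 1" (applied after the d-carry)
def pvStepM (s : Int × Int × Int) : Int × Int × Int :=
  if s.2.1 > 12 then (s.1 + 1, 1, s.2.2) else s

-- "d += 1; if d > 31: m += 1; d = 1", then the m-carry
def pvStep (s : Int × Int × Int) : Int × Int × Int :=
  pvStepM (if s.2.2 + 1 > 31 then (s.1, s.2.1 + 1, 1) else (s.1, s.2.1, s.2.2 + 1))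

-- A's while loop; the Nat fuel is only a totality guard (the loop state strictly
-- approaches the bound, so the generous fuel below is never exhausted)
def pvLoopA (tgt : Int × Int × Int) : Nat → (Int × Int × Int) → List (Int × Int × Int)
  | 0, _ => []
  | fuel + 1, s => if pvCond tgt s then s :: pvLoopA tgt fuel (pvStep s) else []

def date_range (date_from : Int × Int × Int) (date_to : Int × Int × Int) : List (Int × Int × Int) :=
  pvLoopA date_to ((372 * (date_to.1 - date_from.1) + 1000).toNat) date_from

-- ===== PORT B =====
-- (y*12 + m-1)*31 + d-1
def pvEnc (s : Int × Int × Int) : Int := (s.1 * 12 + s.2.1 - 1) * 31 + s.2.2 - 1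

-- the comprehension body: (n // 372, n // 31 % 12 + 1, n % 31 + 1)
def pvDec (n : Int) : Int × Int × Int :=
  (PySem.Int.floordiv n 372,
   PySem.Int.mod (PySem.Int.floordiv n 31) 12 + 1,
   PySem.Int.mod n 31 + 1)

-- tuple(date_from) > tuple(date_to): Python's lexicographic tuple comparison
def pvGtB (a b : Int × Int × Int) : Bool :=
  b.1 < a.1 || (a.1 == b.1 && b.2.1 < a.2.1) || (a.1 == b.1 && a.2.1 == b.2.1 && b.2.2 < a.2.2)

def date_range_alt (date_from : Int × Int × Int) (date_to : Int × Int × Int) : List (Int × Int × Int) :=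
  if pvGtB date_from date_to then []
  else (PySem.List.pyRange (pvEnc date_from) (pvEnc date_to + 1) 1).map pvDec

-- ===== PRECONDITION & SPEC =====
-- Pre_ admits all inputs with well-formed calendar bounds (1 ≤ m ≤ 12, 1 ≤ d ≤ 31) and all
-- empty ranges (date_from > date_to); it excludes only non-empty ranges with a malformed bound,
-- where A still returns but the raw/partially-carried tuples it emits are accidents of its
-- carry order, outside the function's natural domain.
def Pre_date_range (date_from : Int × Int × Int) (date_to : Int × Int × Int) : Prop :=
  ((1 ≤ date_from.2.1 ∧ date_from.2.1 ≤ 12 ∧ 1 ≤ date_from.2.2 ∧ date_from.2.2 ≤ 31) ∧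
   (1 ≤ date_to.2.1 ∧ date_to.2.1 ≤ 12 ∧ 1 ≤ date_to.2.2 ∧ date_to.2.2 ≤ 31)) ∨
  (date_to.1 < date_from.1 ∨ (date_to.1 = date_from.1 ∧ date_to.2.1 < date_from.2.1) ∨
   (date_to.1 = date_from.1 ∧ date_to.2.1 = date_from.2.1 ∧ date_to.2.2 < date_from.2.2))

instance (date_from : Int × Int × Int) (date_to : Int × Int × Int) : Decidable (Pre_date_range date_from date_to) := by unfold Pre_date_range; infer_instance

def pvWitness_date_range : (Int × Int × Int) × (Int × Int × Int) := ((2020, 1, 30), (2020, 2, 2))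

def Spec_date_range (date_from : Int × Int × Int) (date_to : Int × Int × Int) (out : List (Int × Int × Int)) : Prop := out = date_range_alt date_from date_to
instance (date_from : Int × Int × Int) (date_to : Int × Int × Int) (out : List (Int × Int × Int)) : Decidable (Spec_date_range date_from date_to out) := by unfold Spec_date_range; infer_instance

-- ===== CLAIM (what is proved, stated in full; the proofs are below) =====
def Claim_equal_date_range : Prop := ∀ (date_from : Int × Int × Int) (date_to : Int × Int × Int), Dom_date_range date_from date_to → Pre_date_range date_from date_to → Spec_date_range date_from date_to (date_range date_from date_to)

-- ===== LEMMAS AND PROOFS =====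

-- 1 ≤ m ≤ 12 and 1 ≤ d ≤ 31
def pvNorm (s : Int × Int × Int) : Prop :=
  1 ≤ s.2.1 ∧ s.2.1 ≤ 12 ∧ 1 ≤ s.2.2 ∧ s.2.2 ≤ 31

-- for normalized states, A's loop condition is exactly "enc s ≤ enc tgt"
lemma pv_cond_iff (tgt s : Int × Int × Int) (hs : pvNorm s) (ht : pvNorm tgt) :
    pvCond tgt s = true ↔ pvEnc s ≤ pvEnc tgt := by
  obtain ⟨y, m, d⟩ := s
  obtain ⟨yt, mt, dt⟩ := tgt
  unfold pvNorm at hs ht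
  unfold pvCond pvEnc
  dsimp only at *
  simp only [Bool.or_eq_true, Bool.and_eq_true, decide_eq_true_eq, beq_iff_eq]
  constructor <;> intro hc <;> omega

lemma pv_step_norm (s : Int × Int × Int) (h : pvNorm s) :
    pvNorm (pvStep s) ∧ pvEnc (pvStep s) = pvEnc s + 1 := by
  obtain ⟨y, m, d⟩ := s
  unfold pvNorm at h
  unfold pvStep pvStepM pvNorm pvEnc
  dsimp only at *
  split_ifs <;> simp_all <;> omega

lemma pv_dec_enc (s : Int × Int × Int) (h : pvNorm s) : pvDec (pvEnc s) = s := by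
  obtain ⟨y, m, d⟩ := s
  unfold pvNorm at h
  unfold pvDec pvEnc
  dsimp only at *
  simp only [PySem.Int.floordiv_eq_ediv_of_pos (by norm_num : (0:Int) < 372),
             PySem.Int.floordiv_eq_ediv_of_pos (by norm_num : (0:Int) < 31),
             PySem.Int.mod_eq_emod_of_pos (by norm_num : (0:Int) < 31),
             PySem.Int.mod_eq_emod_of_pos (by norm_num : (0:Int) < 12)]
  refine Prod.ext ?_ (Prod.ext ?_ ?_) <;> dsimp only <;> omega

-- from a normalized state, with enough fuel, A's loop is exactly the decoded integer range
lemma pv_loopA_norm (tgt : Int × Int × Int) (ht : pvNorm tgt) :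
    ∀ (k fuel : Nat) (s : Int × Int × Int), pvNorm s → (pvEnc tgt + 1 - pvEnc s).toNat = k →
      k ≤ fuel →
      pvLoopA tgt fuel s = (PySem.List.pyRange (pvEnc s) (pvEnc tgt + 1) 1).map pvDec := by
  intro k
  induction k with
  | zero =>
    intro fuel s hn hk _
    have hc : ¬ (pvCond tgt s = true) := by rw [pv_cond_iff tgt s hn ht]; omega
    cases fuel with
    | zero =>
      rw [pvLoopA, PySem.List.pyRange_one_eq_nil (by omega)]
      simp
    | succ fuel =>
      rw [pvLoopA, if_neg hc, PySem.List.pyRange_one_eq_nil (by omega)]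
      simp
  | succ k ih =>
    intro fuel s hn hk hf
    obtain ⟨fuel, rfl⟩ : ∃ m, fuel = m + 1 := ⟨fuel - 1, by omega⟩
    have hc : pvCond tgt s = true := by rw [pv_cond_iff tgt s hn ht]; omega
    have hle : pvEnc s ≤ pvEnc tgt := by rw [pv_cond_iff tgt s hn ht] at hc; exact hc
    obtain ⟨hn', he⟩ := pv_step_norm s hn
    rw [pvLoopA, if_pos hc]
    rw [PySem.List.pyRange_one_cons (by omega)]
    rw [List.map_cons, pv_dec_enc s hn]
    rw [ih fuel (pvStep s) hn' (by omega) (by omega), he]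

-- B's guard is A's loop condition negated
lemma pv_gt_iff (f t : Int × Int × Int) : pvGtB f t = true ↔ ¬ (pvCond t f = true) := by
  obtain ⟨y, m, d⟩ := f
  obtain ⟨yt, mt, dt⟩ := t
  unfold pvGtB pvCond
  dsimp only
  simp only [Bool.or_eq_true, Bool.and_eq_true, decide_eq_true_eq, beq_iff_eq]
  omega

lemma pv_loopA_stop (tgt s : Int × Int × Int) (h : ¬ (pvCond tgt s = true)) :
    ∀ fuel, pvLoopA tgt fuel s = [] := by
  intro fuel
  cases fuel with
  | zero => rw [pvLoopA]
  | succ fuel => rw [pvLoopA, if_neg h]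

-- ===== VERDICT (by name: the statement is the Claim_ definition above) =====
theorem date_range_spec : Claim_equal_date_range := by
  intro f t _ hpre
  unfold Spec_date_range date_range date_range_alt
  by_cases hg : pvGtB f t = true
  · have hc : ¬ (pvCond t f = true) := (pv_gt_iff f t).mp hg
    rw [if_pos hg, pv_loopA_stop t f hc]
  · have hc : pvCond t f = true := by
      by_contra hc
      exact hg ((pv_gt_iff f t).mpr hc)
    rw [if_neg hg]
    rcases hpre with hpre | hpre
    · refine pv_loopA_norm t hpre.2 _ _ f hpre.1 rfl ?_
      obtain ⟨⟨_, _, _, _⟩, ⟨_, _, _, _⟩⟩ := hpre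
      obtain ⟨y, m, d⟩ := f
      obtain ⟨yt, mt, dt⟩ := t
      unfold pvEnc
      dsimp only at *
      omega
    · exfalso
      revert hc
      obtain ⟨y, m, d⟩ := f
      obtain ⟨yt, mt, dt⟩ := t
      unfold pvCond
      dsimp only at *
      simp only [Bool.or_eq_true, Bool.and_eq_true, decide_eq_true_eq, beq_iff_eq]
      omega
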